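-- pv_equiv track=rewrite | github.com/arpie-steele/symbolic-mgu | pmproofs_history/find_missing_short_proofs.py | is_valid_proof
-- ===== SOURCE A (Python) =====
-- def is_valid_proof(proof_str):
--     """Check if a proof string is valid according to stack rules."""
--     depth = 0
--
--     # Process in reverse (right to left)
--     for char in reversed(proof_str):
--         if char in '123':
--             depth += 1
--         elif char == 'D':
--             if depth < 2:
--                 return False  # Can't use D without 2 items
--             depth -= 1  # Pop 2, push 1 = net -1
--         else:
--             return False  # Invalid character
--
--     return depth == 1  # Must end with exactly 1 item
-- ===== SOURCE B (Python) =====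
-- def is_valid_proof(proof_str):
--     """Recursive-descent parse: a valid proof is exactly one prefix term
--     over binary 'D' with leaves '1','2','3', consuming the whole string."""
--     def parse(i):
--         if i >= len(proof_str):
--             return None
--         c = proof_str[i]
--         if c in '123':
--             return i + 1
--         if c == 'D':
--             j = parse(i + 1)
--             if j is None:
--                 return None
--             return parse(j)
--         return None
--     return parse(0) == len(proof_str)
-- ===== Notes on version B (the rewrite author's own statement) =====
-- stated objective: alternative
-- what changed: Replaces the reversed right-to-left stack-depth simulation by a recursive-descent parser that parses one prefix term (leaves '1'/'2'/'3', binary operator 'D') and requires the whole string to be consumed.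
import Mathlib
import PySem

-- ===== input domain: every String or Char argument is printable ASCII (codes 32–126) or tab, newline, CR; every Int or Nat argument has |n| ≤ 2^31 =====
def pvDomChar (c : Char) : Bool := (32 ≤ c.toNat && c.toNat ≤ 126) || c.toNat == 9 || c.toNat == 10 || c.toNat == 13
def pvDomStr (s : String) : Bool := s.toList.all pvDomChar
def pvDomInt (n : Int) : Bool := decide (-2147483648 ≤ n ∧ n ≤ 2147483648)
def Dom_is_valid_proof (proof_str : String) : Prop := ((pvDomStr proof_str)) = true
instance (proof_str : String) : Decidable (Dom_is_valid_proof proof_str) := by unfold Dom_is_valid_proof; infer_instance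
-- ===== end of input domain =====

-- B replaces A's reversed stack-depth simulation by a recursive-descent parser for
-- prefix terms (alternative algorithm, same O(n) cost).


-- ===== PORT A =====
-- `char in '123'`
def pvLeaf (c : Char) : Bool := c == '1' || c == '2' || c == '3'

-- the `for char in reversed(proof_str)` loop with the trailing `return depth == 1`
def pvLoopA : List Char → Int → Bool
  | [], depth => depth == 1
  | c :: cs, depth =>
    if pvLeaf c then pvLoopA cs (depth + 1)
    else if c == 'D' then
      if depth < 2 then false else pvLoopA cs (depth - 1)
    else false

def is_valid_proof (proof_str : String) : Bool :=
  pvLoopA proof_str.toList.reverse 0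

-- ===== PORT B =====
-- `c in '123'`
def pvIsLeaf (c : Char) : Bool := c == '1' || c == '2' || c == '3'

-- B's inner `parse(i)`: returns the remaining suffix after parsing one prefix term
-- (Python returns the new index; over lists this is the suffix from that index;
-- None → none).  The fuel argument is only a totality device: len+1 always suffices.
def pvParse : Nat → List Char → Option (List Char)
  | 0, _ => none
  | _ + 1, [] => none
  | fuel + 1, c :: cs =>
    if pvIsLeaf c then some cs
    else if c == 'D' then
      match pvParse fuel cs with
      | some rest => pvParse fuel rest
      | none => none
    else none

-- `return parse(0) == len(proof_str)` : fully consumed ⇔ remaining suffix is []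
def is_valid_proof_alt (proof_str : String) : Bool :=
  pvParse (proof_str.toList.length + 1) proof_str.toList == some []

-- ===== PRECONDITION & SPEC =====
def Spec_is_valid_proof (proof_str : String) (out : Bool) : Prop := out = is_valid_proof_alt proof_str
instance (proof_str : String) (out : Bool) : Decidable (Spec_is_valid_proof proof_str out) := by unfold Spec_is_valid_proof; infer_instance

-- ===== CLAIM (what is proved, stated in full; the proofs are below) =====
def Claim_equal_is_valid_proof : Prop := ∀ (proof_str : String), Dom_is_valid_proof proof_str → Spec_is_valid_proof proof_str (is_valid_proof proof_str)

-- ===== LEMMAS AND PROOFS =====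

/-- Well-formed prefix terms: a leaf, or `'D'` followed by two terms. -/
inductive PTerm : List Char → Prop where
  | leaf (c : Char) : pvIsLeaf c = true → PTerm [c]
  | node (t1 t2 : List Char) : PTerm t1 → PTerm t2 → PTerm ('D' :: (t1 ++ t2))

/-- Signed count: +1 per leaf, -1 per other character. -/
def pvS : List Char → Int
  | [] => 0
  | c :: cs => (if pvLeaf c then 1 else -1) + pvS cs

/-- Every character is a leaf or `'D'`. -/
def pvOk (l : List Char) : Bool := l.all (fun c => pvLeaf c || c == 'D')

theorem pvS_append (p s : List Char) : pvS (p ++ s) = pvS p + pvS s := by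
  induction p with
  | nil => simp [pvS]
  | cons c cs ih => simp [pvS, ih]; ring

theorem pvS_reverse (l : List Char) : pvS l.reverse = pvS l := by
  induction l with
  | nil => rfl
  | cons c cs ih => simp [pvS, List.reverse_cons, pvS_append, ih]; ring

theorem pvOk_cons (c : Char) (cs : List Char) :
    pvOk (c :: cs) = ((pvLeaf c || c == 'D') && pvOk cs) := by
  simp [pvOk]

theorem pvOk_append (p s : List Char) : pvOk (p ++ s) = (pvOk p && pvOk s) := by
  simp [pvOk]

theorem pvOk_reverse (l : List Char) : pvOk l.reverse = pvOk l := by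
  simp [pvOk]

theorem pvLeaf_D : pvLeaf 'D' = false := by decide

theorem pvLeaf_eq_isLeaf (c : Char) : pvLeaf c = pvIsLeaf c := rfl

/-- Characterization of A's loop. -/
theorem pvLoopA_char (l : List Char) : ∀ d : Int,
    pvLoopA l d = true ↔
      (pvOk l = true ∧ (∀ p s, l = p ++ 'D' :: s → d + pvS p ≥ 2) ∧ d + pvS l = 1) := by
  induction l with
  | nil =>
    intro d
    simp only [pvLoopA, pvOk, pvS, List.all_nil, beq_iff_eq, true_and]
    constructor
    · intro h
      refine ⟨fun p s h' => absurd h' (by simp), by omega⟩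
    · intro ⟨_, h⟩; omega
  | cons c cs ih =>
    intro d
    by_cases hc : pvLeaf c = true
    · rw [show pvLoopA (c :: cs) d = pvLoopA cs (d + 1) from by simp [pvLoopA, hc], ih]
      constructor
      · rintro ⟨hok, hcond, hsum⟩
        refine ⟨by rw [pvOk_cons, hok, hc]; rfl, ?_, by simp only [pvS, hc, if_true]; omega⟩
        rintro p s hps
        cases p with
        | nil =>
          rw [List.nil_append] at hps
          injection hps with h1 _
          rw [h1, pvLeaf_D] at hc; exact absurd hc (by simp)
        | cons x xs =>
          rw [List.cons_append] at hps
          injection hps with h1 h2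
          have := hcond xs s h2
          rw [← h1]
          simp only [pvS, hc, if_true]; omega
      · rintro ⟨hok, hcond, hsum⟩
        rw [pvOk_cons, Bool.and_eq_true] at hok
        refine ⟨hok.2, ?_, by simp only [pvS, hc, if_true] at hsum; omega⟩
        intro p s hps
        have := hcond (c :: p) s (by rw [hps, List.cons_append])
        simp only [pvS, hc, if_true] at this; omega
    · by_cases hD : c = 'D'
      · subst hD
        by_cases hd : d < 2
        · rw [show pvLoopA ('D' :: cs) d = false from by simp [pvLoopA, hc, hd]]
          simp only [Bool.false_eq_true, false_iff]
          rintro ⟨_, hcond, _⟩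
          have := hcond [] cs (by simp)
          simp only [pvS] at this; omega
        · rw [show pvLoopA ('D' :: cs) d = pvLoopA cs (d - 1) from by simp [pvLoopA, hc, hd], ih]
          constructor
          · rintro ⟨hok, hcond, hsum⟩
            refine ⟨by rw [pvOk_cons, hok]; rfl, ?_, by simp only [pvS, pvLeaf_D, Bool.false_eq_true, if_false]; omega⟩
            rintro p s hps
            cases p with
            | nil =>
              simp only [pvS]; omega
            | cons x xs =>
              rw [List.cons_append] at hps
              injection hps with h1 h2
              have := hcond xs s h2
              rw [← h1]
              simp only [pvS, pvLeaf_D, Bool.false_eq_true, if_false]; omega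
          · rintro ⟨hok, hcond, hsum⟩
            rw [pvOk_cons, Bool.and_eq_true] at hok
            refine ⟨hok.2, ?_, by simp only [pvS, pvLeaf_D, Bool.false_eq_true, if_false] at hsum; omega⟩
            intro p s hps
            have := hcond ('D' :: p) s (by rw [hps, List.cons_append])
            simp only [pvS, pvLeaf_D, Bool.false_eq_true, if_false] at this; omega
      · rw [show pvLoopA (c :: cs) d = false from by simp [pvLoopA, hc, hD]]
        simp only [Bool.false_eq_true, false_iff]
        rintro ⟨hok, _, _⟩
        rw [pvOk_cons, Bool.and_eq_true, Bool.or_eq_true] at hok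
        rcases hok.1 with h | h
        · exact hc h
        · exact hD (by simpa using h)

/-- Under A's conditions every nonempty all-valid list has positive signed count. -/
theorem pv_suffix_pos (l : List Char) (hok : pvOk l = true)
    (hcond : ∀ p s, l = p ++ 'D' :: s → pvS s ≥ 2) :
    pvS l ≥ 0 ∧ (l ≠ [] → pvS l ≥ 1) := by
  induction l with
  | nil => simp [pvS]
  | cons c cs ih =>
    rw [pvOk_cons, Bool.and_eq_true, Bool.or_eq_true] at hok
    have ih' := ih hok.2 (fun p s hps => hcond (c :: p) s (by rw [hps, List.cons_append]))
    rcases hok.1 with hc | hD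
    · have h0 := ih'.1
      refine ⟨?_, fun _ => ?_⟩ <;> simp only [pvS, hc, if_true] <;> omega
    · have hc : c = 'D' := by simpa using hD
      subst hc
      have := hcond [] cs (by simp)
      refine ⟨?_, fun _ => ?_⟩ <;> simp only [pvS, pvLeaf_D, Bool.false_eq_true, if_false] <;> omega

/-- Running A's loop over a reversed term increments the depth by one. -/
theorem pvLoopA_term (t : List Char) (ht : PTerm t) :
    ∀ (rest : List Char) (d : Int), 0 ≤ d →
      pvLoopA (t.reverse ++ rest) d = pvLoopA rest (d + 1) := by
  induction ht with
  | leaf c hc =>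
    intro rest d _
    have hc' : pvLeaf c = true := by rw [pvLeaf_eq_isLeaf]; exact hc
    simp [pvLoopA, hc']
  | node t1 t2 h1 h2 ih1 ih2 =>
    intro rest d hd
    have hshape : ('D' :: (t1 ++ t2)).reverse ++ rest
        = t2.reverse ++ (t1.reverse ++ ('D' :: rest)) := by
      simp
    rw [hshape, ih2 _ d hd, ih1 _ (d + 1) (by omega)]
    have hD2 : ¬ (d + 1 + 1 < 2) := by omega
    simp [pvLoopA, pvLeaf_D, hD2]

/-- Parser soundness: a successful parse consumed one well-formed term. -/
theorem pvParse_sound : ∀ (f : Nat) (l r : List Char),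
    pvParse f l = some r → ∃ t, PTerm t ∧ l = t ++ r := by
  intro f
  induction f with
  | zero => intro l r h; simp [pvParse] at h
  | succ f ih =>
    intro l r h
    cases l with
    | nil => simp [pvParse] at h
    | cons c cs =>
      by_cases hc : pvIsLeaf c = true
      · simp [pvParse, hc] at h
        exact ⟨[c], PTerm.leaf c hc, by rw [← h]; rfl⟩
      · by_cases hD : c = 'D'
        · subst hD
          simp only [pvParse, hc, Bool.false_eq_true, if_false, beq_self_eq_true, if_true] at h
          cases hm : pvParse f cs with
          | none => rw [hm] at h; simp at h
          | some m =>
            rw [hm] at h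
            obtain ⟨t1, ht1, hcs⟩ := ih cs m hm
            obtain ⟨t2, ht2, hm2⟩ := ih m r h
            refine ⟨'D' :: (t1 ++ t2), PTerm.node t1 t2 ht1 ht2, ?_⟩
            rw [hcs, hm2]; simp
        · simp [pvParse, hc, hD] at h

/-- Parser completeness: with enough fuel, a term followed by anything parses. -/
theorem pvParse_complete (t : List Char) (ht : PTerm t) :
    ∀ (f : Nat) (r : List Char), t.length ≤ f → pvParse f (t ++ r) = some r := by
  induction ht with
  | leaf c hc =>
    intro f r hf
    cases f with
    | zero => exfalso; simp at hf
    | succ g => simp [pvParse, hc]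
  | node t1 t2 h1 h2 ih1 ih2 =>
    intro f r hf
    cases f with
    | zero => exfalso; simp at hf
    | succ g =>
      have hlen : ('D' :: (t1 ++ t2)).length = t1.length + t2.length + 1 := by
        simp [List.length_append]
      rw [hlen] at hf
      have hg1 : t1.length ≤ g := by omega
      have hg2 : t2.length ≤ g := by omega
      have hshape : ('D' :: (t1 ++ t2)) ++ r = 'D' :: (t1 ++ (t2 ++ r)) := by simp
      rw [hshape]
      simp [pvParse, pvIsLeaf, ih1 g (t2 ++ r) hg1, ih2 g r hg2]

/-- Discrete IVT: the first prefix whose signed count reaches `k ≥ 1`. -/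
theorem pvFirst : ∀ (l : List Char) (k : Int), 1 ≤ k → k ≤ pvS l →
    ∃ p s, l = p ++ s ∧ pvS p = k ∧ ∀ q u, p = q ++ u → u ≠ [] → pvS q < k := by
  intro l
  induction l with
  | nil => intro k h1 h2; simp only [pvS] at h2; omega
  | cons c cs ih =>
    intro k h1 h2
    by_cases hc : pvLeaf c = true
    · by_cases hk : k = 1
      · subst hk
        refine ⟨[c], cs, rfl, by simp [pvS, hc], ?_⟩
        intro q u hqu hu
        cases q with
        | nil => simp [pvS]
        | cons x xs =>
          rw [List.cons_append] at hqu
          injection hqu with _ h2'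
          exact absurd (List.append_eq_nil_iff.mp h2'.symm).2 hu
      · have hcs : k - 1 ≤ pvS cs := by
          simp only [pvS, hc, if_true] at h2; omega
        obtain ⟨p', s, hps, hsum, hmin⟩ := ih (k - 1) (by omega) hcs
        refine ⟨c :: p', s, by rw [hps, List.cons_append], by simp [pvS, hc]; omega, ?_⟩
        intro q u hqu hu
        cases q with
        | nil => simp [pvS]; omega
        | cons x xs =>
          rw [List.cons_append] at hqu
          injection hqu with hx hxs
          have := hmin xs u hxs hu
          rw [← hx]; simp [pvS, hc]; omega
    · have hcs : k + 1 ≤ pvS cs := by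
        simp only [pvS, hc, Bool.false_eq_true, if_false] at h2; omega
      obtain ⟨p', s, hps, hsum, hmin⟩ := ih (k + 1) (by omega) hcs
      refine ⟨c :: p', s, by rw [hps, List.cons_append], by simp [pvS, hc]; omega, ?_⟩
      intro q u hqu hu
      cases q with
      | nil => simp [pvS]; omega
      | cons x xs =>
        rw [List.cons_append] at hqu
        injection hqu with hx hxs
        have := hmin xs u hxs hu
        rw [← hx]; simp [pvS, hc]; omega

/-- The count conditions characterize well-formed terms. -/
theorem pvTerm_of_cond : ∀ (n : Nat) (l : List Char), l.length ≤ n →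
    pvOk l = true → pvS l = 1 →
    (∀ p s, l = p ++ s → s ≠ [] → 1 ≤ pvS s) → PTerm l := by
  intro n
  induction n with
  | zero =>
    intro l hn _ hs _
    have : l = [] := List.eq_nil_of_length_eq_zero (by omega)
    rw [this] at hs; simp [pvS] at hs
  | succ n ih =>
    intro l hn hok hsum hsuf
    cases l with
    | nil => simp [pvS] at hsum
    | cons c cs =>
      rw [pvOk_cons, Bool.and_eq_true, Bool.or_eq_true] at hok
      rcases hok.1 with hc | hD
      · -- leaf head: the tail must be empty
        have hcs0 : pvS cs = 0 := by simp only [pvS, hc, if_true] at hsum; omega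
        have hnil : cs = [] := by
          by_contra hne
          have := hsuf [c] cs rfl hne
          omega
        subst hnil
        exact PTerm.leaf c (by rw [← pvLeaf_eq_isLeaf]; exact hc)
      · have hc : c = 'D' := by simpa using hD
        subst hc
        have hcs2 : pvS cs = 2 := by
          simp only [pvS, pvLeaf_D, Bool.false_eq_true, if_false] at hsum; omega
        obtain ⟨t1, t2, hsplit, ht1s, hmin⟩ := pvFirst cs 1 (by omega) (by omega)
        have hokcs := hok.2
        rw [hsplit, pvOk_append, Bool.and_eq_true] at hokcs
        have hlen : cs.length ≤ n := by simp at hn; omega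
        have hlen1 : t1.length ≤ n := by
          have := congrArg List.length hsplit
          simp [List.length_append] at this; omega
        have hlen2 : t2.length ≤ n := by
          have := congrArg List.length hsplit
          simp [List.length_append] at this; omega
        have ht2s : pvS t2 = 1 := by
          have := pvS_append t1 t2
          rw [← hsplit] at this; omega
        have hPT1 : PTerm t1 := by
          refine ih t1 hlen1 hokcs.1 ht1s ?_
          intro p s hps hs
          have hlt := hmin p s hps hs
          have : pvS t1 = pvS p + pvS s := by rw [hps, pvS_append]
          omega
        have hPT2 : PTerm t2 := by
          refine ih t2 hlen2 hokcs.2 ht2s ?_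
          intro p s hps hs
          have : 'D' :: cs = ('D' :: (t1 ++ p)) ++ s := by
            rw [hsplit, hps]; simp
          exact hsuf _ s this hs
        have : 'D' :: cs = 'D' :: (t1 ++ t2) := by rw [hsplit]
        rw [this]
        exact PTerm.node t1 t2 hPT1 hPT2

/-- If A accepts, the string is a well-formed term. -/
theorem pvTerm_of_A (l : List Char) (hA : pvLoopA l.reverse 0 = true) : PTerm l := by
  rw [pvLoopA_char] at hA
  obtain ⟨hok, hcond, hsum⟩ := hA
  rw [pvOk_reverse] at hok
  rw [pvS_reverse] at hsum
  have hcond' : ∀ a b, l = a ++ 'D' :: b → pvS b ≥ 2 := by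
    intro a b hab
    have hrev : l.reverse = b.reverse ++ 'D' :: a.reverse := by rw [hab]; simp
    have h2 := hcond b.reverse a.reverse hrev
    have := pvS_reverse b
    omega
  refine pvTerm_of_cond l.length l (le_refl _) hok (by omega) ?_
  intro p s hps hs
  have hoks : pvOk s = true := by
    rw [hps, pvOk_append, Bool.and_eq_true] at hok; exact hok.2
  exact (pv_suffix_pos s hoks
    (fun a b hab => hcond' (p ++ a) b (by rw [hps, hab, List.append_assoc]))).2 hs

theorem pv_main (l : List Char) :
    pvLoopA l.reverse 0 = (pvParse (l.length + 1) l == some []) := by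
  by_cases hA : pvLoopA l.reverse 0 = true
  · have ht := pvTerm_of_A l hA
    have := pvParse_complete l ht (l.length + 1) [] (by omega)
    rw [List.append_nil] at this
    rw [hA, this]; rfl
  · have hA' : pvLoopA l.reverse 0 = false := by simpa using hA
    rw [hA']
    by_contra h
    have hbe : (pvParse (l.length + 1) l == some []) = true := by
      cases hb : (pvParse (l.length + 1) l == some []) with
      | true => rfl
      | false => exact absurd hb.symm h
    have hp : pvParse (l.length + 1) l = some [] := by simpa using hbe
    obtain ⟨t, ht, hl⟩ := pvParse_sound _ _ _ hp
    rw [List.append_nil] at hl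
    subst hl
    have := pvLoopA_term l ht [] 0 (le_refl _)
    rw [List.append_nil] at this
    rw [this] at hA'
    simp [pvLoopA] at hA'

-- ===== VERDICT (by name: the statement is the Claim_ definition above) =====
theorem is_valid_proof_spec : Claim_equal_is_valid_proof := by
  intro s _
  unfold Spec_is_valid_proof is_valid_proof is_valid_proof_alt
  exact pv_main s.toList
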